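-- pv_equiv track=rewrite | github.com/mihikakrishna/AdventOfCode2023 | day4/solution2.py | processCards
-- ===== SOURCE A (Python) =====
-- def getMatchesPerCard(cardPair):
--     winningCardsSet, yourCardsSet = set(cardPair[0]), set(cardPair[1])
--     matches = 0
--     for card in yourCardsSet:
--         matches += 1 if card in winningCardsSet else 0
--     return matches
--
-- def processCards(cardsArray):
--     cardInstances = [1 for i in range(len(cardsArray))]
--     for i in range(len(cardsArray)):
--         cardPair = cardsArray[i]
--         matches = getMatchesPerCard(cardPair)
--         for j in range(i + 1, i + matches + 1):
--             if j == len(cardInstances):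
--                 break
--             cardInstances[j] += cardInstances[i]
--
--     return(sum(cardInstances))
-- ===== SOURCE B (Python) =====
-- def processCards(cardsArray):
--     # Backward dynamic programming: worths[k] is the total number of cards
--     # (itself plus the whole cascade it triggers) produced by ONE copy of the
--     # k-th remaining card.  worth(i) = 1 + sum of worth(i+1..i+matches), built
--     # right-to-left; the answer is the sum of worths over the original cards.
--     worths = []
--     for winning, yours in reversed(cardsArray):
--         m = len(set(winning) & set(yours))
--         worths.insert(0, 1 + sum(worths[:m]))
--     return sum(worths)
-- ===== Notes on version B (the rewrite author's own statement) =====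
-- stated objective: alternative
-- what changed: Replaces A's forward propagation of instance counts into an index-addressed copies array by a right-to-left dynamic program that computes each card's total 'worth' (itself plus its whole cascade) from the worths of later cards and sums the worths once.
import Mathlib
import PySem

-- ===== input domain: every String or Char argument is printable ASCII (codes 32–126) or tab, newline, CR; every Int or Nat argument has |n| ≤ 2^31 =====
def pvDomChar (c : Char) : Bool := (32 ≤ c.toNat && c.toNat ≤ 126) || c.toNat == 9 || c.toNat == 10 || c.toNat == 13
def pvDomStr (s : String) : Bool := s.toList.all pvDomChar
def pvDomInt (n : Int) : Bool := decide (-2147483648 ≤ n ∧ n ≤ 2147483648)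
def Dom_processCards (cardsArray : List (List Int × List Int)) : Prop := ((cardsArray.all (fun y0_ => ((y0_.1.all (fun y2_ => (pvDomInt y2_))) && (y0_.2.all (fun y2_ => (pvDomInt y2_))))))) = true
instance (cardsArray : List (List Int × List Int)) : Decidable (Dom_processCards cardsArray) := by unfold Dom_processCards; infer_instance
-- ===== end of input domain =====

-- B replaces A's forward propagation of instance counts into a copies array by a right-to-left
-- dynamic program computing each card's total "worth" (itself plus its cascade) and summing once
-- (alternative structure, same cost class).

-- ===== PORT A =====
def getMatchesPerCard (cardPair : List Int × List Int) : Int :=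
  let winningCardsSet : PySem.Set Int := PySem.Set.ofList cardPair.1
  let yourCardsSet : PySem.Set Int := PySem.Set.ofList cardPair.2
  -- iterating a Python set here only accumulates a count, which is independent of the set's order
  yourCardsSet.foldl (fun acc card => acc + (if winningCardsSet.contains card then 1 else 0)) 0

-- inner 'for j in range(i+1, i+matches+1): if j == len(cardInstances): break; cardInstances[j] += cardInstances[i]'
def processCardsInner (inst : List Int) (i : Int) (js : List Int) : List Int :=
  match js with
  | [] => inst
  | j :: rest =>
    if j = (inst.length : Int) then inst
    else processCardsInner (PySem.List.pySetD inst j (PySem.List.pyGetD inst j 0 + PySem.List.pyGetD inst i 0)) i rest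

-- body of A's outer 'for i in range(len(cardsArray))' loop
def processCardsStep (cardsArray : List (List Int × List Int)) (inst : List Int) (i : Int) : List Int :=
  let cardPair := PySem.List.pyGetD cardsArray i ([], [])
  let m := getMatchesPerCard cardPair
  processCardsInner inst i (PySem.List.pyRange (i + 1) (i + m + 1) 1)

def processCards (cardsArray : List (List Int × List Int)) : Int :=
  let cardInstances := (PySem.List.pyRange 0 (cardsArray.length : Int) 1).map (fun _ => (1 : Int))
  ((PySem.List.pyRange 0 (cardsArray.length : Int) 1).foldl (processCardsStep cardsArray) cardInstances).sum

-- ===== PORT B =====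
def countMatches (winning yours : List Int) : Int :=
  ((PySem.Set.inter (PySem.Set.ofList winning) (PySem.Set.ofList yours)).length : Int)

-- one step of B's reversed loop: 'worths.insert(0, 1 + sum(worths[:m]))'
def worthsStep (p : List Int × List Int) (worths : List Int) : List Int :=
  (1 + (worths.take (countMatches p.1 p.2).toNat).sum) :: worths

def processCards_alt (cardsArray : List (List Int × List Int)) : Int :=
  (cardsArray.foldr worthsStep []).sum

-- ===== PRECONDITION & SPEC =====
def Spec_processCards (cardsArray : List (List Int × List Int)) (out : Int) : Prop := out = processCards_alt cardsArray
instance (cardsArray : List (List Int × List Int)) (out : Int) : Decidable (Spec_processCards cardsArray out) := by unfold Spec_processCards; infer_instance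

-- ===== CLAIM (what is proved, stated in full; the proofs are below) =====
def Claim_equal_processCards : Prop := ∀ (cardsArray : List (List Int × List Int)), Dom_processCards cardsArray → Spec_processCards cardsArray (processCards cardsArray)

-- ===== LEMMAS AND PROOFS =====

-- proof-side name for B's foldr
def worths (l : List (List Int × List Int)) : List Int := l.foldr worthsStep []

lemma worths_length (l : List (List Int × List Int)) : (worths l).length = l.length := by
  induction l with
  | nil => rfl
  | cons p rest ih => simp [worths, worthsStep] at ih ⊢; exact ih

lemma worths_drop (l : List (List Int × List Int)) : ∀ k, (worths l).drop k = worths (l.drop k) := by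
  induction l with
  | nil => intro k; simp [worths]
  | cons p rest ih =>
      intro k
      cases k with
      | zero => rfl
      | succ k => simpa [worths, worthsStep] using ih k

-- both match counts are the size of set(winning) ∩ set(yours)
lemma matches_eq (p : List Int × List Int) : getMatchesPerCard p = countMatches p.1 p.2 := by
  unfold getMatchesPerCard countMatches
  have hfold : ∀ (P : Int → Bool) (l : List Int) (a : Int),
      l.foldl (fun m c => m + if P c then 1 else 0) a
        = l.foldl (fun m c => if P c then m + 1 else m) a := by
    intro P l
    induction l with
    | nil => intro a; rfl
    | cons x xs ih =>
        intro a; simp only [List.foldl_cons]; rw [ih]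
        congr 1
        by_cases h : P x <;> simp [h]
  rw [hfold, PySem.List.foldl_count_if, List.countP_eq_length_filter]
  have hperm :
      ((PySem.Set.ofList p.2).filter (fun c => (PySem.Set.ofList p.1).contains c)).Perm
        (PySem.Set.inter (PySem.Set.ofList p.1) (PySem.Set.ofList p.2)) := by
    apply List.perm_of_nodup_nodup_toFinset_eq
    · exact List.Nodup.filter _ (PySem.Set.nodup_ofList _)
    · exact List.Nodup.filter _ (PySem.Set.nodup_ofList _)
    · ext x
      simp only [List.mem_toFinset, List.mem_filter, PySem.Set.inter,
        PySem.Set.contains_iff, PySem.Set.mem_ofList]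
      tauto
  rw [hperm.length_eq]
  simp

lemma countMatches_nonneg (w y : List Int) : 0 ≤ countMatches w y := by
  simp [countMatches]

-- combining a point update with a later half-open range add
lemma ite_split (x v a b t : Int) (hab : a < b) :
    (x + (if t = a then v else 0)) + (if a + 1 ≤ t ∧ t < b then v else 0)
      = x + (if a ≤ t ∧ t < b then v else 0) := by
  by_cases h1 : t = a
  · subst h1
    rw [if_pos rfl, if_neg (by omega), if_pos ⟨le_refl _, hab⟩]
    ring
  · rw [if_neg h1, add_zero]
    by_cases h2 : a ≤ t ∧ t < b
    · rw [if_pos (by omega), if_pos h2]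
    · rw [if_neg (by omega), if_neg h2]

-- A's inner loop adds inst[i] to every in-range slot j with a ≤ j < b and leaves the rest alone
lemma processCardsInner_spec_aux (i : Int) (hi : 0 ≤ i) :
    ∀ (n : Nat) (a b : Int), (b - a).toNat = n → ∀ (inst : List Int), i < a →
    (processCardsInner inst i (PySem.List.pyRange a b 1)).length = inst.length ∧
    ∀ t : Nat, t < inst.length →
      (processCardsInner inst i (PySem.List.pyRange a b 1)).getD t 0 =
        inst.getD t 0 + (if a ≤ (t : Int) ∧ (t : Int) < b then PySem.List.pyGetD inst i 0 else 0) := by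
  intro n
  induction n with
  | zero =>
    intro a b hn inst hia
    rw [PySem.List.pyRange_one_eq_nil (by omega)]
    refine ⟨rfl, ?_⟩
    intro t ht
    have : ¬(a ≤ (t : Int) ∧ (t : Int) < b) := by omega
    simp [processCardsInner, this]
  | succ n ih =>
    intro a b hn inst hia
    have hab : a < b := by omega
    have ha0 : 0 ≤ a := by omega
    rw [PySem.List.pyRange_one_cons hab]
    simp only [processCardsInner]
    by_cases hbreak : a = (inst.length : Int)
    · rw [if_pos hbreak]
      refine ⟨rfl, ?_⟩
      intro t ht
      have : ¬(a ≤ (t : Int) ∧ (t : Int) < b) := by omega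
      simp [this]
    · rw [if_neg hbreak]
      set w : Int := PySem.List.pyGetD inst a 0 + PySem.List.pyGetD inst i 0 with hw
      set inst₁ : List Int := PySem.List.pySetD inst a w with hinst₁
      have hlen1 : inst₁.length = inst.length := PySem.List.length_pySetD ..
      obtain ⟨ihlen, ihget⟩ := ih (a + 1) b (by omega) inst₁ (by omega)
      refine ⟨by rw [ihlen, hlen1], ?_⟩
      intro t ht
      rw [ihget t (by omega)]
      by_cases hain : a < (inst.length : Int)
      · -- in-range update at position a
        have hacast : ((a.toNat : Nat) : Int) = a := Int.toNat_of_nonneg ha0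
        have hicast : ((i.toNat : Nat) : Int) = i := Int.toNat_of_nonneg hi
        have haN : a.toNat < inst.length := by omega
        have hgd : ∀ m : Nat, inst₁.getD m 0
            = if m = a.toNat then w else inst.getD m 0 := by
          intro m
          have := PySem.List.pyGetD_pySetD_natCast inst a.toNat m w 0 haN
          rw [hacast] at this
          simpa using this
        have hvi : PySem.List.pyGetD inst₁ i 0 = PySem.List.pyGetD inst i 0 := by
          have := PySem.List.pyGetD_pySetD_natCast inst a.toNat i.toNat w 0 haN
          rw [hacast, hicast] at this
          rw [hinst₁, this, if_neg (by omega)]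
        rw [hvi, hgd t]
        have hstep : (if t = a.toNat then w else inst.getD t 0)
            = inst.getD t 0 + (if (t : Int) = a then PySem.List.pyGetD inst i 0 else 0) := by
          by_cases h1 : t = a.toNat
          · have h2 : (t : Int) = a := by omega
            rw [if_pos h1, if_pos h2, h1, hw, ← hacast, PySem.List.pyGetD_natCast]
            simp [max_eq_left ha0]
          · have h2 : ¬((t : Int) = a) := by omega
            simp [h1, h2]
        rw [hstep]
        exact ite_split _ _ a b t hab
      · -- a out of range: the assignment is a no-op and the slot condition is vacuous
        have hnone : PySem.List.pySet? inst a w = none := by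
          rw [PySem.List.pySet?_eq_none_iff]
          intro hr
          rcases hr with ⟨_, h2⟩
          omega
        have hid : inst₁ = inst := by
          rw [hinst₁]; unfold PySem.List.pySetD; rw [hnone]; rfl
        rw [hid]
        have heq : (a + 1 ≤ (t : Int) ∧ (t : Int) < b) ↔ (a ≤ (t : Int) ∧ (t : Int) < b) := by omega
        congr 1
        exact if_congr heq rfl rfl

lemma processCardsInner_spec (i : Int) (hi : 0 ≤ i) (a b : Int) (inst : List Int) (hia : i < a) :
    (processCardsInner inst i (PySem.List.pyRange a b 1)).length = inst.length ∧
    ∀ t : Nat, t < inst.length →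
      (processCardsInner inst i (PySem.List.pyRange a b 1)).getD t 0 =
        inst.getD t 0 + (if a ≤ (t : Int) ∧ (t : Int) < b then PySem.List.pyGetD inst i 0 else 0) :=
  processCardsInner_spec_aux i hi (b - a).toNat a b rfl inst hia

-- (take (m+1)).sum adds the m-th slot (or nothing beyond the end, where getD is 0)
lemma take_succ_sum (L : List Int) (m : Nat) :
    (L.take (m + 1)).sum = (L.take m).sum + L.getD m 0 := by
  by_cases h : m < L.length
  · rw [List.sum_take_succ _ _ h, List.getD_eq_getElem _ _ h]
  · rw [List.take_of_length_le (by omega), List.take_of_length_le (by omega),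
      List.getD_eq_default _ _ (by omega)]
    ring

-- a take-after-drop sum is an Ico sum of getD (overflow slots contribute 0)
lemma takeSum_Ico (W : List Int) (a : Nat) : ∀ m : Nat,
    ((W.drop a).take m).sum = ∑ j ∈ Finset.Ico a (a + m), W.getD j 0 := by
  intro m
  induction m with
  | zero => simp
  | succ m ih =>
      rw [take_succ_sum, ih, show a + (m + 1) = (a + m) + 1 by omega,
        Finset.sum_Ico_succ_top (by omega)]
      congr 1
      simp [List.getD_eq_getElem?_getD, List.getElem?_drop]

-- an Ico sum of getD cut at the length equals the uncut one
lemma sum_ite_lt (W : List Int) (a c : Nat) (ha : a ≤ W.length) :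
    ∑ j ∈ Finset.Ico a W.length, (if j < c then W.getD j 0 else 0)
      = ∑ j ∈ Finset.Ico a c, W.getD j 0 := by
  rw [← Finset.sum_filter, Finset.Ico_filter_lt]
  by_cases hc : c ≤ W.length
  · rw [min_eq_right hc]
  · rw [min_eq_left (by omega)]
    have hz : ∑ j ∈ Finset.Ico W.length c, W.getD j 0 = 0 := by
      apply Finset.sum_eq_zero
      intro j hj
      rw [Finset.mem_Ico] at hj
      exact List.getD_eq_default _ _ hj.1
    rw [← Finset.sum_Ico_consecutive (fun j => W.getD j 0) ha (by omega : W.length ≤ c), hz]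
    ring

-- B's backward recurrence, read off position k of the worths list
lemma W_rec (l : List (List Int × List Int)) (k : Nat) (hk : k < l.length) :
    (worths l).getD k 0
      = 1 + ∑ j ∈ Finset.Ico (k + 1)
            (k + 1 + (countMatches (l[k]'hk).1 (l[k]'hk).2).toNat), (worths l).getD j 0 := by
  have hdropk : (worths l).drop k = worths (l.drop k) := worths_drop l k
  have hcons : l.drop k = l[k]'hk :: l.drop (k + 1) := List.drop_eq_getElem_cons hk
  have hlenW : (worths l).length = l.length := worths_length l
  have hhead : (worths l).getD k 0 = (worths (l.drop k)).getD 0 0 := by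
    rw [← hdropk]
    simp [List.getD_eq_getElem?_getD, List.getElem?_drop]
  rw [hhead, hcons]
  show (worthsStep (l[k]'hk) (worths (l.drop (k + 1)))).getD 0 0 = _
  rw [show worthsStep (l[k]'hk) (worths (l.drop (k + 1)))
      = (1 + ((worths (l.drop (k + 1))).take (countMatches (l[k]'hk).1 (l[k]'hk).2).toNat).sum)
        :: worths (l.drop (k + 1)) from rfl]
  rw [List.getD_cons_zero, ← worths_drop, takeSum_Ico]

-- the main invariant: A's remaining fold, weighted by B's worths
lemma invA (cs : List (List Int × List Int)) :
    ∀ (d k : Nat) (inst : List Int), cs.length - k = d → k ≤ cs.length →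
      inst.length = cs.length →
    ((PySem.List.pyRange (k : Int) (cs.length : Int) 1).foldl (processCardsStep cs) inst).sum
      = (∑ j ∈ Finset.Ico 0 k, inst.getD j 0)
        + ∑ j ∈ Finset.Ico k cs.length, inst.getD j 0 * (worths cs).getD j 0 := by
  intro d
  induction d with
  | zero =>
    intro k inst hd hk hlen
    have hk' : k = cs.length := by omega
    rw [PySem.List.pyRange_one_eq_nil (by omega)]
    subst hk'
    rw [Finset.Ico_self, Finset.sum_empty, add_zero, ← hlen]
    have h2 := takeSum_Ico inst 0 inst.length
    simpa using h2
  | succ d ih =>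
    intro k inst hd hk hlen
    have hklt : k < cs.length := by omega
    have hlenW : (worths cs).length = cs.length := worths_length cs
    rw [PySem.List.pyRange_one_cons (by exact_mod_cast hklt)]
    simp only [List.foldl_cons]
    have hpair : PySem.List.pyGetD cs (k : Int) (([], []) : List Int × List Int) = cs[k] := by
      rw [PySem.List.pyGetD_natCast]; exact List.getD_eq_getElem _ _ hklt
    set mI : Int := countMatches (cs[k]'hklt).1 (cs[k]'hklt).2 with hmI
    have hm0 : 0 ≤ mI := countMatches_nonneg _ _
    set mN : Nat := mI.toNat with hmN
    have hmcast : (mN : Int) = mI := Int.toNat_of_nonneg hm0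
    have hstepA : processCardsStep cs inst (k : Int)
        = processCardsInner inst (k : Int)
            (PySem.List.pyRange ((k : Int) + 1) ((k : Int) + mI + 1) 1) := by
      unfold processCardsStep
      simp only [hpair, matches_eq, hmI]
    rw [hstepA]
    obtain ⟨hlenA, hgetA⟩ :=
      processCardsInner_spec (k : Int) (by omega) ((k : Int) + 1) ((k : Int) + mI + 1) inst
        (by omega)
    generalize hI : processCardsInner inst (k : Int)
        (PySem.List.pyRange ((k : Int) + 1) ((k : Int) + mI + 1) 1) = inst' at hlenA hgetA ⊢
    set vk : Int := inst.getD k 0 with hvk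
    have hvi : PySem.List.pyGetD inst (k : Int) 0 = vk := by
      rw [PySem.List.pyGetD_natCast]
    have hget' : ∀ j : Nat, j < cs.length →
        inst'.getD j 0 = inst.getD j 0 + (if k + 1 ≤ j ∧ j < k + 1 + mN then vk else 0) := by
      intro j hj
      rw [hgetA j (by omega), hvi]
      congr 1
      have hcond : ((k : Int) + 1 ≤ (j : Int) ∧ (j : Int) < (k : Int) + mI + 1)
          ↔ (k + 1 ≤ j ∧ j < k + 1 + mN) := by omega
      exact if_congr hcond rfl rfl
    rw [show ((k : Int) + 1) = (((k + 1 : Nat)) : Int) by push_cast; ring,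
      ih (k + 1) inst' (by omega) (by omega) (by omega)]
    -- first sum
    have hsum1 : ∑ j ∈ Finset.Ico 0 (k + 1), inst'.getD j 0
        = (∑ j ∈ Finset.Ico 0 k, inst.getD j 0) + vk := by
      rw [Finset.sum_Ico_succ_top (by omega)]
      congr 1
      · apply Finset.sum_congr rfl
        intro j hj
        rw [Finset.mem_Ico] at hj
        rw [hget' j (by omega), if_neg (by omega)]
        ring
      · rw [hget' k (by omega), if_neg (by omega)]
        simp [hvk]
    -- second sum
    have hsum2 : ∑ j ∈ Finset.Ico (k + 1) cs.length, inst'.getD j 0 * (worths cs).getD j 0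
        = (∑ j ∈ Finset.Ico (k + 1) cs.length, inst.getD j 0 * (worths cs).getD j 0)
          + vk * ∑ j ∈ Finset.Ico (k + 1) (k + 1 + mN), (worths cs).getD j 0 := by
      have hsplit : ∀ j ∈ Finset.Ico (k + 1) cs.length,
          inst'.getD j 0 * (worths cs).getD j 0
            = inst.getD j 0 * (worths cs).getD j 0
              + vk * (if j < k + 1 + mN then (worths cs).getD j 0 else 0) := by
        intro j hj
        rw [Finset.mem_Ico] at hj
        rw [hget' j hj.2]
        by_cases hc : j < k + 1 + mN
        · rw [if_pos ⟨hj.1, hc⟩, if_pos hc]; ring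
        · rw [if_neg (by omega), if_neg hc]; ring
      rw [Finset.sum_congr rfl hsplit, Finset.sum_add_distrib, ← Finset.mul_sum]
      congr 2
      rw [← hlenW] at hklt ⊢
      exact sum_ite_lt (worths cs) (k + 1) (k + 1 + mN) (by omega)
    rw [hsum1, hsum2]
    -- close with B's recurrence at k
    rw [Finset.sum_eq_sum_Ico_succ_bot hklt (fun j => inst.getD j 0 * (worths cs).getD j 0)]
    rw [W_rec cs k hklt, ← hmI, ← hmN]
    ring

-- ===== VERDICT (by name: the statement is the Claim_ definition above) =====
theorem processCards_spec : Claim_equal_processCards := by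
  intro cs _
  show processCards cs = processCards_alt cs
  unfold processCards processCards_alt
  have h0 : ((PySem.List.pyRange 0 (cs.length : Int) 1).map (fun _ => (1 : Int)))
      = List.replicate cs.length 1 := by
    rw [PySem.List.pyRange_one, List.map_map]
    have hc : ((fun _ => (1 : Int)) ∘ fun k : Nat => (0 : Int) + (k : Int)) = fun _ => (1 : Int) := rfl
    rw [hc, List.map_const', List.length_range]
    norm_num
  rw [h0]
  show (List.foldl (processCardsStep cs) (List.replicate cs.length 1)
      (PySem.List.pyRange 0 (cs.length : Int) 1)).sum = (cs.foldr worthsStep []).sum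
  have hinv := invA cs cs.length 0 (List.replicate cs.length 1) (by omega) (by omega) (by simp)
  rw [Nat.cast_zero] at hinv
  rw [hinv, Finset.Ico_self, Finset.sum_empty, zero_add]
  have hlenW : (worths cs).length = cs.length := worths_length cs
  have hones : ∀ j ∈ Finset.Ico 0 cs.length,
      (List.replicate cs.length (1 : Int)).getD j 0 * (worths cs).getD j 0
        = (worths cs).getD j 0 := by
    intro j hj
    rw [Finset.mem_Ico] at hj
    rw [List.getD_replicate _ hj.2]
    ring
  rw [Finset.sum_congr rfl hones]
  have := takeSum_Ico (worths cs) 0 cs.length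
  rw [← hlenW]
  show ∑ j ∈ Finset.Ico 0 (worths cs).length, (worths cs).getD j 0 = (cs.foldr worthsStep []).sum
  have h2 := takeSum_Ico (worths cs) 0 (worths cs).length
  simp only [List.drop_zero, List.take_length, zero_add] at h2
  rw [← h2]
  rfl
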